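-- pv_equiv track=rewrite | github.com/XueyangSong/EE274-Project | compressors/LZSS.py | find_match_basic
-- ===== SOURCE A (Python) =====
-- def find_match_basic(s, search_idx, match_idx, greedy_optimal) -> (int, [int], [int]):
--     assert (
--         match_idx >= search_idx
--     ), f"Match index at {match_idx} starts before search index at {search_idx}"
--     match_count = 0
--     max_match_length = 0
--     lengths, offsets = [], []
--     search_start, search_end, look_ahead_start, look_ahead_end = (
--         search_idx,
--         search_idx,
--         match_idx,
--         match_idx,
--     )
--     while search_start < look_ahead_start and search_end < len(s) and look_ahead_end < len(s):
--         while (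
--             look_ahead_end < len(s)
--             and search_end < len(s)
--             and (s[look_ahead_end] == s[search_end])
--         ):
--             look_ahead_end += 1
--             search_end += 1
--             if greedy_optimal == "greedy":
--                 if look_ahead_end - look_ahead_start >= max_match_length:
--                     lengths, offsets = [look_ahead_end - look_ahead_start], [
--                         look_ahead_start - search_start
--                     ]
--                     max_match_length = lengths[0]
--                     match_count = 1
--             elif greedy_optimal == "optimal":
--                 if look_ahead_end - look_ahead_start > 0:
--                     lengths.append(look_ahead_end - look_ahead_start)
--                     offsets.append(look_ahead_start - search_start)
--                     match_count += 1
--         search_start += 1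
--         search_end = search_start
--         look_ahead_end = look_ahead_start
--     return match_count, lengths, offsets
-- ===== SOURCE B (Python) =====
-- def _lcp(x, y):
--     k = 0
--     for a, b in zip(x, y):
--         if a != b:
--             break
--         k += 1
--     return k
--
--
-- def find_match_basic(s, search_idx, match_idx, greedy_optimal) -> (int, [int], [int]):
--     assert (
--         match_idx >= search_idx
--     ), f"Match index at {match_idx} starts before search index at {search_idx}"
--     m = match_idx
--     if m >= len(s):  # empty lookahead: no match is possible
--         return 0, [], []
--     pat = s[m:]
--     starts = list(range(search_idx, m))
--     ls = [_lcp(s[j:], pat) for j in starts]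
--     if greedy_optimal == "greedy":
--         best, bj = 0, None
--         for j, l in zip(starts, ls):
--             if l >= best and l > 0:
--                 best, bj = l, j
--         if bj is None:
--             return 0, [], []
--         return 1, [best], [m - bj]
--     if greedy_optimal == "optimal":
--         lengths = [t for l in ls for t in range(1, l + 1)]
--         offsets = [m - j for j, l in zip(starts, ls) for _ in range(l)]
--         return sum(ls), lengths, offsets
--     return 0, [], []
-- ===== Notes on version B (the rewrite author's own statement) =====
-- stated objective: alternative
-- what changed: A interleaves match-finding and result-selection inside two nested while loops with per-character mutable bookkeeping; B first computes the longest-common-prefix length of the lookahead against every window start (one slice-zip scan per start), then builds the result in a second closed phase: a single last-argmax fold for 'greedy' and flat comprehensions for 'optimal'.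
-- outside the precondition, e.g. on find_match_basic('aa', -2, -1, 'greedy'): A returns (1, [3], [1]), B returns (1, [1], [1])
import Mathlib
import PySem

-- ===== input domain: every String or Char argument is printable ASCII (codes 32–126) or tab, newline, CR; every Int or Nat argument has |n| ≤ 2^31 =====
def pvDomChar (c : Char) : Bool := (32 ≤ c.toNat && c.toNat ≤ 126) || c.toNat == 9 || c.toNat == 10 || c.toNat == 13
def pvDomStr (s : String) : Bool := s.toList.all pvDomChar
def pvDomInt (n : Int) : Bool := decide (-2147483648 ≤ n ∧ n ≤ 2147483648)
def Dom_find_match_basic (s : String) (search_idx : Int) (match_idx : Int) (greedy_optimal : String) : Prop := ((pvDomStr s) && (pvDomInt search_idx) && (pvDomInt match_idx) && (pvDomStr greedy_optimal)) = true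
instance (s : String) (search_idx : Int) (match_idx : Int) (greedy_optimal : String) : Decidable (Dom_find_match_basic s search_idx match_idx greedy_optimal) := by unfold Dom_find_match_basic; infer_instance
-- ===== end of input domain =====

-- B separates the two phases A interleaves: it first computes the longest-common-prefix length of the
-- lookahead with every window start, then builds the result per mode in one closed construction
-- (objective: alternative decomposition, same asymptotic cost).

-- ===== PORT A =====
-- Inner `while` of A: advances look_ahead_end/search_end while the characters match, updating the
-- bookkeeping exactly as the Python does.  `s[i]` is ported as PySem.List.pyGet?; inside Pre_ both
-- indices are nonnegative and in range whenever they are read, so the Option comparison is exact.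
def fmbInner (cs : List Char) (go : String) (las ss : Int)
    (lae se mc mml : Int) (lengths offsets : List Int) :
    Int × Int × Int × Int × List Int × List Int :=
  if h : lae < (cs.length : Int) ∧ se < (cs.length : Int) ∧
      PySem.List.pyGet? cs lae = PySem.List.pyGet? cs se then
    let lae' := lae + 1
    let se' := se + 1
    if go == "greedy" then
      if lae' - las ≥ mml then
        fmbInner cs go las ss lae' se' 1 (lae' - las) [lae' - las] [las - ss]
      else
        fmbInner cs go las ss lae' se' mc mml lengths offsets
    else if go == "optimal" then
      if lae' - las > 0 then
        fmbInner cs go las ss lae' se' (mc + 1) mml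
          (lengths ++ [lae' - las]) (offsets ++ [las - ss])
      else
        fmbInner cs go las ss lae' se' mc mml lengths offsets
    else
      fmbInner cs go las ss lae' se' mc mml lengths offsets
  else
    (lae, se, mc, mml, lengths, offsets)
termination_by ((cs.length : Int) - lae).toNat
decreasing_by all_goals (have := h.1; omega)

-- Outer `while` of A: one iteration per search_start, then reset search_end/look_ahead_end.
def fmbOuter (cs : List Char) (go : String) (las : Int)
    (ss se lae mc mml : Int) (lengths offsets : List Int) :
    Int × List Int × List Int :=
  if h : ss < las ∧ se < (cs.length : Int) ∧ lae < (cs.length : Int) then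
    match fmbInner cs go las ss lae se mc mml lengths offsets with
    | (_, _, mc', mml', L', O') =>
      fmbOuter cs go las (ss + 1) (ss + 1) las mc' mml' L' O'
  else
    (mc, lengths, offsets)
termination_by (las - ss).toNat
decreasing_by have := h.1; omega

def find_match_basic (s : String) (search_idx : Int) (match_idx : Int) (greedy_optimal : String) : Int × List Int × List Int :=
  fmbOuter s.toList greedy_optimal match_idx search_idx search_idx match_idx 0 0 [] []

-- ===== PORT B =====
-- port of _lcp: count leading equal pairs of zip(x, y)
def countEq : List (Char × Char) → Int
  | [] => 0
  | (a, b) :: r => if a ≠ b then 0 else countEq r + 1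

def find_match_basic_alt (s : String) (search_idx : Int) (match_idx : Int) (greedy_optimal : String) : Int × List Int × List Int :=
  let cs := s.toList
  let m := match_idx
  if m ≥ (cs.length : Int) then (0, [], []) else
  let pat := PySem.List.slice cs (some m) none
  let starts := PySem.List.pyRange search_idx m 1
  let ls := starts.map (fun j => countEq ((PySem.List.slice cs (some j) none).zip pat))
  if greedy_optimal == "greedy" then
    match (starts.zip ls).foldl
        (fun (st : Int × Option Int) (p : Int × Int) =>
          if p.2 ≥ st.1 ∧ p.2 > 0 then (p.2, some p.1) else st)
        ((0 : Int), (none : Option Int)) with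
    | (_, none) => (0, [], [])
    | (best, some j) => (1, [best], [m - j])
  else if greedy_optimal == "optimal" then
    (ls.sum,
     ls.flatMap (fun l => PySem.List.pyRange 1 (l + 1) 1),
     (starts.zip ls).flatMap (fun p => (PySem.List.pyRange 0 p.2 1).map (fun _ => m - p.1)))
  else
    (0, [], [])

-- ===== PRECONDITION & SPEC =====
-- Pre_ restricts to the natural domain of the routine: match_idx ≥ search_idx (otherwise A raises
-- AssertionError) and a nonnegative search index (a negative one makes A read s[i] through Python's
-- negative-index wraparound — outside the natural domain of a window search).
def Pre_find_match_basic (s : String) (search_idx : Int) (match_idx : Int) (greedy_optimal : String) : Prop :=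
  0 ≤ search_idx ∧ search_idx ≤ match_idx
instance (s : String) (search_idx : Int) (match_idx : Int) (greedy_optimal : String) : Decidable (Pre_find_match_basic s search_idx match_idx greedy_optimal) := by unfold Pre_find_match_basic; infer_instance

def pvWitness_find_match_basic : String × Int × Int × String := ("ababab", 0, 2, "optimal")

def Spec_find_match_basic (s : String) (search_idx : Int) (match_idx : Int) (greedy_optimal : String) (out : Int × List Int × List Int) : Prop := out = find_match_basic_alt s search_idx match_idx greedy_optimal
instance (s : String) (search_idx : Int) (match_idx : Int) (greedy_optimal : String) (out : Int × List Int × List Int) : Decidable (Spec_find_match_basic s search_idx match_idx greedy_optimal out) := by unfold Spec_find_match_basic; infer_instance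

-- ===== CLAIM (what is proved, stated in full; the proofs are below) =====
def Claim_equal_find_match_basic : Prop := ∀ (s : String) (search_idx : Int) (match_idx : Int) (greedy_optimal : String), Dom_find_match_basic s search_idx match_idx greedy_optimal → Pre_find_match_basic s search_idx match_idx greedy_optimal → Spec_find_match_basic s search_idx match_idx greedy_optimal (find_match_basic s search_idx match_idx greedy_optimal)

-- ===== LEMMAS AND PROOFS =====

-- Character-scan form of the longest common prefix length, matching A's inner-loop guard.
def scanLcp (cs : List Char) (lae se : Int) : Nat :=
  if h : lae < (cs.length : Int) ∧ se < (cs.length : Int) ∧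
      PySem.List.pyGet? cs lae = PySem.List.pyGet? cs se then
    scanLcp cs (lae + 1) (se + 1) + 1
  else 0
termination_by ((cs.length : Int) - lae).toNat
decreasing_by have := h.1; omega
theorem lcp_eq (cs : List Char) (m j : Int) (hm : 0 ≤ m) (hj : 0 ≤ j) :
    countEq ((cs.drop j.toNat).zip (cs.drop m.toNat)) = (scanLcp cs m j : Int) := by
  rw [scanLcp]
  by_cases hml : m < (cs.length : Int)
  · by_cases hjl : j < (cs.length : Int)
    · have hm' : m.toNat < cs.length := by omega
      have hj' : j.toNat < cs.length := by omega
      rw [List.drop_eq_getElem_cons hj', List.drop_eq_getElem_cons hm', List.zip_cons_cons]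
      by_cases heq : cs[j.toNat] = cs[m.toNat]
      · rw [dif_pos ⟨hml, hjl, by
          rw [PySem.List.pyGet?_eq_some_getElem cs hm hml, PySem.List.pyGet?_eq_some_getElem cs hj hjl,
            heq]⟩]
        have h1 : j.toNat + 1 = (j + 1).toNat := by omega
        have h2 : m.toNat + 1 = (m + 1).toNat := by omega
        rw [h1, h2]
        have ih := lcp_eq cs (m + 1) (j + 1) (by omega) (by omega)
        simp [countEq, heq, ih]
      · rw [dif_neg (by
          rw [PySem.List.pyGet?_eq_some_getElem cs hm hml, PySem.List.pyGet?_eq_some_getElem cs hj hjl]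
          simp
          intro _ _ hv
          exact heq hv.symm)]
        simp [countEq, heq]
    · have hd : cs.drop j.toNat = [] := List.drop_eq_nil_of_le (by omega)
      rw [dif_neg (by intro hc; exact hjl hc.2.1)]
      simp [hd, countEq]
  · have hd : cs.drop m.toNat = [] := List.drop_eq_nil_of_le (by omega)
    rw [dif_neg (by intro hc; exact hml hc.1)]
    simp [hd, countEq]
termination_by (cs.length - m.toNat)
decreasing_by omega
theorem map_range_succ_shift (e : Nat) (c : Int) :
    (List.range (e + 1)).map (fun (t : Nat) => c + (t : Int)) =
      c :: (List.range e).map (fun (t : Nat) => (c + 1) + (t : Int)) := by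
  rw [List.range_succ_eq_map, List.map_cons, List.map_map]
  congr 1
  · norm_num
  · apply List.map_congr_left
    intro t _
    simp only [Function.comp_apply]
    push_cast
    ring
theorem inner_other (cs : List Char) (go : String) (hg : (go == "greedy") = false)
    (ho : (go == "optimal") = false) (las ss lae se mc mml : Int) (L O : List Int) :
    fmbInner cs go las ss lae se mc mml L O =
      (lae + (scanLcp cs lae se : Int), se + (scanLcp cs lae se : Int), mc, mml, L, O) := by
  rw [fmbInner, scanLcp]
  by_cases h : lae < (cs.length : Int) ∧ se < (cs.length : Int) ∧
      PySem.List.pyGet? cs lae = PySem.List.pyGet? cs se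
  · rw [dif_pos h, dif_pos h]
    simp only [hg, ho, Bool.false_eq_true, if_false]
    rw [inner_other cs go hg ho las ss (lae + 1) (se + 1) mc mml L O]
    simp only [Prod.mk.injEq, and_true]
    constructor <;> (push_cast; ring)
  · rw [dif_neg h, dif_neg h]
    simp
termination_by ((cs.length : Int) - lae).toNat
decreasing_by have := h.1; omega

theorem inner_optimal (cs : List Char) (las ss se mc mml : Int) (L O : List Int)
    (k : Int) (hk : 0 ≤ k) :
    fmbInner cs "optimal" las ss (las + k) se mc mml L O =
      (las + k + (scanLcp cs (las + k) se : Int),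
       se + (scanLcp cs (las + k) se : Int),
       mc + (scanLcp cs (las + k) se : Int), mml,
       L ++ (List.range (scanLcp cs (las + k) se)).map (fun (t : Nat) => (k + 1) + (t : Int)),
       O ++ List.replicate (scanLcp cs (las + k) se) (las - ss)) := by
  rw [fmbInner, scanLcp]
  by_cases h : las + k < (cs.length : Int) ∧ se < (cs.length : Int) ∧
      PySem.List.pyGet? cs (las + k) = PySem.List.pyGet? cs se
  · rw [dif_pos h, dif_pos h]
    simp only [show (("optimal" : String) == "greedy") = false from rfl,
      show (("optimal" : String) == "optimal") = true from rfl, Bool.false_eq_true, if_false,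
      if_true]
    rw [if_pos (show las + k + 1 - las > 0 by omega)]
    have e2 : las + k + 1 - las = k + 1 := by ring
    have e1 : las + k + 1 = las + (k + 1) := by ring
    rw [e2, e1]
    rw [inner_optimal cs las ss (se + 1) (mc + 1) mml (L ++ [k + 1]) (O ++ [las - ss])
      (k + 1) (by omega)]
    rw [map_range_succ_shift, List.replicate_succ]
    simp only [Prod.mk.injEq, List.append_assoc, List.singleton_append, and_true]
    refine ⟨by push_cast; ring, by push_cast; ring, by push_cast; ring⟩
  · rw [dif_neg h, dif_neg h]
    simp
termination_by ((cs.length : Int) - (las + k)).toNat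
decreasing_by all_goals (have := h.1; omega)

theorem inner_greedy (cs : List Char) (las ss se mc mml : Int) (L O : List Int)
    (k : Int) (hk : 0 ≤ k) :
    fmbInner cs "greedy" las ss (las + k) se mc mml L O =
      (if scanLcp cs (las + k) se = 0 ∨ k + (scanLcp cs (las + k) se : Int) < mml then
        (las + k + (scanLcp cs (las + k) se : Int),
         se + (scanLcp cs (las + k) se : Int), mc, mml, L, O)
      else
        (las + k + (scanLcp cs (las + k) se : Int),
         se + (scanLcp cs (las + k) se : Int), 1,
         k + (scanLcp cs (las + k) se : Int),
         [k + (scanLcp cs (las + k) se : Int)], [las - ss])) := by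
  rw [fmbInner, scanLcp]
  by_cases h : las + k < (cs.length : Int) ∧ se < (cs.length : Int) ∧
      PySem.List.pyGet? cs (las + k) = PySem.List.pyGet? cs se
  · rw [dif_pos h, dif_pos h]
    simp only [show (("greedy" : String) == "greedy") = true from rfl, if_true]
    have e2 : las + k + 1 - las = k + 1 := by ring
    have e1 : las + k + 1 = las + (k + 1) := by ring
    by_cases hcmp : las + k + 1 - las ≥ mml
    · rw [if_pos hcmp, e2, e1]
      rw [inner_greedy cs las ss (se + 1) 1 (k + 1) [k + 1] [las - ss] (k + 1) (by omega)]
      rw [e2] at hcmp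
      split_ifs with h1 h2 h2 <;>
        (try rcases h1 with h1 | h1) <;> (try rcases h2 with h2 | h2) <;>
        first
          | (exfalso; omega)
          | (simp only [Prod.mk.injEq, List.cons.injEq, and_true, true_and, and_self];
             push_cast at hcmp ⊢; try push_cast at h1; try push_cast at h2; omega)
    · rw [if_neg hcmp, e1]
      rw [inner_greedy cs las ss (se + 1) mc mml L O (k + 1) (by omega)]
      rw [e2] at hcmp
      split_ifs with h1 h2 h2 <;>
        (try rcases h1 with h1 | h1) <;> (try rcases h2 with h2 | h2) <;>
        first
          | (exfalso; omega)
          | (simp only [Prod.mk.injEq, List.cons.injEq, and_true, true_and, and_self];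
             push_cast at hcmp ⊢; try push_cast at h1; try push_cast at h2; omega)
  · rw [dif_neg h, dif_neg h]
    simp
termination_by ((cs.length : Int) - (las + k)).toNat
decreasing_by all_goals (have := h.1; omega)
def gstep : Int × Option Int → Int × Int → Int × Option Int :=
  fun st p => if p.2 ≥ st.1 ∧ p.2 > 0 then (p.2, some p.1) else st

def stOfG (las : Int) : Int × Option Int → Int × Int × List Int × List Int
  | (b, none) => (0, b, [], [])
  | (b, some j) => (1, b, [b], [las - j])

def finG (las : Int) : Int × Option Int → Int × List Int × List Int
  | (_, none) => (0, [], [])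
  | (b, some j) => (1, [b], [las - j])

theorem stOfG_21 (las : Int) (st : Int × Option Int) : (stOfG las st).2.1 = st.1 := by
  obtain ⟨b, bj⟩ := st; cases bj <;> rfl

theorem finG_proj (las : Int) (st : Int × Option Int) :
    finG las st = ((stOfG las st).1, (stOfG las st).2.2.1, (stOfG las st).2.2.2) := by
  obtain ⟨b, bj⟩ := st; cases bj <;> rfl

theorem foldl_gstep_zero (l : List Int) (st : Int × Option Int) :
    (l.map (fun j => (j, (0 : Int)))).foldl gstep st = st := by
  induction l generalizing st with
  | nil => rfl
  | cons x t ih => simp only [List.map_cons, List.foldl_cons, gstep]; rw [if_neg (by omega)]; exact ih st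

theorem scanLcp_zero_of_len_le (cs : List Char) (las j : Int) (hn : (cs.length : Int) ≤ las) :
    scanLcp cs las j = 0 := by
  rw [scanLcp, dif_neg (by intro hx; omega)]

theorem outer_greedy (cs : List Char) (las : Int) (hlas : 0 ≤ las) (ss : Int) (hss : 0 ≤ ss)
    (st : Int × Option Int) :
    fmbOuter cs "greedy" las ss ss las (stOfG las st).1 (stOfG las st).2.1
      (stOfG las st).2.2.1 (stOfG las st).2.2.2 =
      finG las (((PySem.List.pyRange ss las 1).map
        (fun j => (j, (scanLcp cs las j : Int)))).foldl gstep st) := by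
  rw [fmbOuter]
  by_cases hc : ss < las ∧ ss < (cs.length : Int) ∧ las < (cs.length : Int)
  · rw [dif_pos hc]
    have ig := inner_greedy cs las ss ss (stOfG las st).1 (stOfG las st).2.1
      (stOfG las st).2.2.1 (stOfG las st).2.2.2 0 le_rfl
    simp only [add_zero, zero_add] at ig
    rw [ig, stOfG_21, PySem.List.pyRange_one_cons hc.1, List.map_cons, List.foldl_cons]
    by_cases htr : (scanLcp cs las ss = 0 ∨ (scanLcp cs las ss : Int) < st.1)
    · rw [if_pos htr]
      have hgs : gstep st (ss, (scanLcp cs las ss : Int)) = st := by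
        simp only [gstep]
        rw [if_neg (by rintro ⟨h1, h2⟩; rcases htr with htr | htr <;> omega)]
      rw [hgs]
      have ihh := outer_greedy cs las hlas (ss + 1) (by omega) st
      rw [stOfG_21] at ihh
      exact ihh
    · rw [if_neg htr]
      push_neg at htr
      have hgs : gstep st (ss, (scanLcp cs las ss : Int)) =
          ((scanLcp cs las ss : Int), some ss) := by
        simp only [gstep]
        rw [if_pos (by constructor <;> [exact htr.2; omega])]
      rw [hgs]
      have h2 := outer_greedy cs las hlas (ss + 1) (by omega)
        ((scanLcp cs las ss : Int), some ss)
      simp only [stOfG] at h2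
      exact h2
  · rw [dif_neg hc]
    by_cases hsl : las ≤ ss
    · rw [PySem.List.pyRange_one_eq_nil hsl]
      simp only [List.map_nil, List.foldl_nil]
      rw [finG_proj]
    · have hn : (cs.length : Int) ≤ las := by
        by_contra hlt
        exact hc ⟨by omega, by omega, by omega⟩
      rw [List.map_congr_left
        (fun j _ => by simp [scanLcp_zero_of_len_le cs las j hn] :
          ∀ j ∈ PySem.List.pyRange ss las 1,
            (fun j => (j, (scanLcp cs las j : Int))) j = (fun j => (j, (0 : Int))) j)]
      rw [foldl_gstep_zero, finG_proj]
termination_by (las - ss).toNat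
decreasing_by all_goals (have := hc.1; omega)

theorem outer_optimal (cs : List Char) (las : Int) (hlas : 0 ≤ las) (ss : Int) (hss : 0 ≤ ss)
    (mc mml : Int) (L O : List Int) :
    fmbOuter cs "optimal" las ss ss las mc mml L O =
      (mc + ((PySem.List.pyRange ss las 1).map (fun j => (scanLcp cs las j : Int))).sum,
       L ++ (PySem.List.pyRange ss las 1).flatMap
         (fun j => (List.range (scanLcp cs las j)).map (fun (t : Nat) => 1 + (t : Int))),
       O ++ (PySem.List.pyRange ss las 1).flatMap
         (fun j => List.replicate (scanLcp cs las j) (las - j))) := by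
  rw [fmbOuter]
  by_cases hc : ss < las ∧ ss < (cs.length : Int) ∧ las < (cs.length : Int)
  · rw [dif_pos hc]
    have ig := inner_optimal cs las ss ss mc mml L O 0 le_rfl
    simp only [add_zero, zero_add] at ig
    rw [ig]
    show fmbOuter cs "optimal" las (ss + 1) (ss + 1) las (mc + (scanLcp cs las ss : Int)) mml
      (L ++ (List.range (scanLcp cs las ss)).map (fun (t : Nat) => 1 + (t : Int)))
      (O ++ List.replicate (scanLcp cs las ss) (las - ss)) = _
    rw [outer_optimal cs las hlas (ss + 1) (by omega)]
    rw [PySem.List.pyRange_one_cons hc.1, List.map_cons, List.flatMap_cons, List.flatMap_cons,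
      List.sum_cons]
    simp only [List.append_assoc, Prod.mk.injEq, and_true]
    ring
  · rw [dif_neg hc]
    by_cases hsl : las ≤ ss
    · rw [PySem.List.pyRange_one_eq_nil hsl]
      simp
    · have hn : (cs.length : Int) ≤ las := by
        by_contra hlt
        exact hc ⟨by omega, by omega, by omega⟩
      have hz : ∀ j ∈ PySem.List.pyRange ss las 1, scanLcp cs las j = 0 :=
        fun j _ => scanLcp_zero_of_len_le cs las j hn
      simp only [Prod.mk.injEq]
      refine ⟨?_, ?_, ?_⟩
      · rw [List.map_congr_left (fun j hj => by simp [hz j hj] :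
          ∀ j ∈ PySem.List.pyRange ss las 1,
            (fun j => (scanLcp cs las j : Int)) j = (fun _ => (0 : Int)) j)]
        simp
      · rw [List.flatMap_eq_nil_iff.mpr (fun j hj => by rw [hz j hj]; simp)]
        simp
      · rw [List.flatMap_eq_nil_iff.mpr (fun j hj => by rw [hz j hj]; simp)]
        simp
termination_by (las - ss).toNat
decreasing_by have := hc.1; omega

theorem outer_other (cs : List Char) (go : String) (hg : (go == "greedy") = false)
    (ho : (go == "optimal") = false) (las ss : Int) (mc mml : Int) (L O : List Int) :
    fmbOuter cs go las ss ss las mc mml L O = (mc, L, O) := by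
  rw [fmbOuter]
  by_cases hc : ss < las ∧ ss < (cs.length : Int) ∧ las < (cs.length : Int)
  · rw [dif_pos hc, inner_other cs go hg ho]
    exact outer_other cs go hg ho las (ss + 1) mc mml L O
  · rw [dif_neg hc]
termination_by (las - ss).toNat
decreasing_by have := hc.1; omega
theorem find_match_basic_spec : Claim_equal_find_match_basic := by
  intro s si mi go hDom hPre
  obtain ⟨h0, h1⟩ := hPre
  unfold Spec_find_match_basic find_match_basic find_match_basic_alt
  simp only []
  by_cases hbig : mi ≥ (s.toList.length : Int)
  · rw [if_pos hbig, fmbOuter, dif_neg (by intro hc; omega)]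
  rw [if_neg hbig]
  have hlcp : ∀ j ∈ PySem.List.pyRange si mi 1,
      countEq ((PySem.List.slice s.toList (some j) none).zip
        (PySem.List.slice s.toList (some mi) none)) = (scanLcp s.toList mi j : Int) := by
    intro j hj
    have hsj : si ≤ j := (PySem.List.mem_pyRange_one.mp hj).1
    rw [PySem.List.slice_from _ (by omega : (0:Int) ≤ j),
      PySem.List.slice_from _ (by omega : (0:Int) ≤ mi)]
    exact lcp_eq s.toList mi j (by omega) (by omega)
  have hzip : (PySem.List.pyRange si mi 1).zip
      ((PySem.List.pyRange si mi 1).map (fun j =>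
        countEq ((PySem.List.slice s.toList (some j) none).zip
          (PySem.List.slice s.toList (some mi) none)))) =
      (PySem.List.pyRange si mi 1).map (fun j => (j, (scanLcp s.toList mi j : Int))) := by
    rw [← List.map_prod_left_eq_zip]
    exact List.map_congr_left (fun j hj => by simp [hlcp j hj])
  by_cases hg : go = "greedy"
  · subst hg
    simp only [show (("greedy" : String) == "greedy") = true from rfl, if_true]
    have og := outer_greedy s.toList mi (by omega) si h0 (0, none)
    simp only [stOfG] at og
    rw [og, hzip,
      show (fun (st : Int × Option Int) (p : Int × Int) =>
        if p.2 ≥ st.1 ∧ p.2 > 0 then (p.2, some p.1) else st) = gstep from rfl]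
    cases hfold : ((PySem.List.pyRange si mi 1).map
        (fun j => (j, (scanLcp s.toList mi j : Int)))).foldl gstep ((0 : Int), (none : Option Int)) with
    | mk b bj => cases bj <;> rfl
  · by_cases ho : go = "optimal"
    · subst ho
      simp only [show (("optimal" : String) == "greedy") = false from rfl,
        show (("optimal" : String) == "optimal") = true from rfl, Bool.false_eq_true, if_false,
        if_true]
      have oo := outer_optimal s.toList mi (by omega) si h0 0 0 [] []
      simp only [zero_add, List.nil_append] at oo
      rw [oo, hzip, List.flatMap_map]
      simp only [Prod.mk.injEq]
      refine ⟨?_, ?_, ?_⟩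
      · congr 1
        exact (List.map_congr_left (fun j hj => by simp [hlcp j hj])).symm
      · refine (List.flatMap_congr (fun j hj => ?_)).symm
        rw [hlcp j hj, PySem.List.pyRange_one]
        simp
      · rw [List.flatMap_map]
        refine (List.flatMap_congr (fun j hj => ?_)).symm
        simp only []
        rw [List.map_const', PySem.List.length_pyRange_one]
        simp
    · have hg' : (go == "greedy") = false := by
        simp [hg]
      have ho' : (go == "optimal") = false := by
        simp [ho]
      simp only [hg', ho', Bool.false_eq_true, if_false]
      exact outer_other s.toList go hg' ho' mi si 0 0 [] []
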